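-- pv_equiv track=rewrite | github.com/bischoff99/ai-orchestration-rag-system | scripts/ingest/chromadb_ingestion.py | get_overlap_sentences
-- ===== SOURCE A (Python) =====
-- from typing import List, Dict, Any, Tuple
--
-- def get_overlap_sentences(sentences: List[str], target_tokens: int) -> List[str]:
--     """Get sentences for overlap based on token count"""
--     overlap_sentences = []
--     token_count = 0
--
--     # Take sentences from the end backwards until we reach target token count
--     for sentence in reversed(sentences):
--         sentence_tokens = len(sentence.split())
--         if token_count + sentence_tokens <= target_tokens:
--             overlap_sentences.insert(0, sentence)
--             token_count += sentence_tokens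
--         else:
--             break
--
--     return overlap_sentences
-- ===== SOURCE B (Python) =====
-- def get_overlap_sentences(sentences, target_tokens):
--     """Get sentences for overlap based on token count"""
--     # Table of cumulative token counts of the last i sentences (monotone, counts >= 0),
--     # then a binary search for the largest i whose suffix sum fits the budget.
--     suffix = [0]
--     for s in reversed(sentences):
--         suffix.append(suffix[-1] + len(s.split()))
--     lo, hi = 0, len(suffix)
--     while lo < hi:
--         mid = (lo + hi) // 2
--         if suffix[mid] <= target_tokens:
--             lo = mid + 1
--         else:
--             hi = mid
--     k = lo - 1
--     if k <= 0:
--         return []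
--     return sentences[len(sentences) - k:]
-- ===== Notes on version B (the rewrite author's own statement) =====
-- stated objective: alternative
-- what changed: Replaces A's backward accumulate-and-break loop by a table-then-search shape: build the monotone array of suffix token sums once, binary-search it for the largest fitting suffix length k, and return the slice sentences[n-k:].
import Mathlib
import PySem

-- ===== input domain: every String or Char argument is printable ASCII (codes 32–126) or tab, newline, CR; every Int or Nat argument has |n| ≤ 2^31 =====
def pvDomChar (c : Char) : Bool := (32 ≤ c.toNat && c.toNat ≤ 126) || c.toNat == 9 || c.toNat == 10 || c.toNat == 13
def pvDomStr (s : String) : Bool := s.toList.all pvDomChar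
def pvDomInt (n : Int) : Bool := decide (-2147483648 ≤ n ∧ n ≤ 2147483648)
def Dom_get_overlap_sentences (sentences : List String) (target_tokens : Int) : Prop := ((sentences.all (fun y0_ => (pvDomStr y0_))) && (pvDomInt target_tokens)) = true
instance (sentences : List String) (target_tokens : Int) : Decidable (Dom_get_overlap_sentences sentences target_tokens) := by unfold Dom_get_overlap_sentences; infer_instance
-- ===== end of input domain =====

-- B replaces A's backward accumulate-and-break loop by a suffix-sum table plus a binary
-- search for the largest fitting suffix length (alternative decomposition, not faster).

-- len(sentence.split()) — the token count of one sentence (both Pythons compute it this way)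
def pvTok (s : String) : Int := ((PySem.Str.split₀ s).length : Int)

-- ===== PORT A =====
-- the `for sentence in reversed(sentences): … break` loop; insert(0, s) is s :: acc
def pvGoA : List String → Int → Int → List String → List String
  | [], _, _, acc => acc
  | s :: rest, target, tc, acc =>
    let st := pvTok s
    if tc + st ≤ target then pvGoA rest target (tc + st) (s :: acc)
    else acc

def get_overlap_sentences (sentences : List String) (target_tokens : Int) : List String :=
  pvGoA sentences.reverse target_tokens 0 []

-- ===== PORT B =====
-- the `suffix = [0]; for s in reversed(sentences): suffix.append(suffix[-1] + …)` loop: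
-- structural recursion carrying the running last element (same values, same order)
def pvSuffixFrom : Int → List String → List Int
  | _, [] => []
  | acc, s :: r => (acc + pvTok s) :: pvSuffixFrom (acc + pvTok s) r

-- the `while lo < hi` bisect loop; suffix[mid] is always in range, so getD is exact
def pvBsearch (suffix : List Int) (t : Int) (lo hi : Nat) : Nat :=
  if lo < hi then
    let mid := (lo + hi) / 2
    if suffix.getD mid 0 ≤ t then pvBsearch suffix t (mid + 1) hi
    else pvBsearch suffix t lo mid
  else lo
termination_by hi - lo
decreasing_by all_goals omega

def get_overlap_sentences_alt (sentences : List String) (target_tokens : Int) : List String :=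
  let suffix := 0 :: pvSuffixFrom 0 sentences.reverse
  let lo := pvBsearch suffix target_tokens 0 suffix.length
  let k : Int := (lo : Int) - 1
  if k ≤ 0 then []
  else PySem.List.slice sentences (some ((sentences.length : Int) - k)) none

-- ===== PRECONDITION & SPEC =====
def Spec_get_overlap_sentences (sentences : List String) (target_tokens : Int) (out : List String) : Prop := out = get_overlap_sentences_alt sentences target_tokens
instance (sentences : List String) (target_tokens : Int) (out : List String) : Decidable (Spec_get_overlap_sentences sentences target_tokens out) := by unfold Spec_get_overlap_sentences; infer_instance

-- ===== CLAIM (what is proved, stated in full; the proofs are below) =====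
def Claim_equal_get_overlap_sentences : Prop := ∀ (sentences : List String) (target_tokens : Int), Dom_get_overlap_sentences sentences target_tokens → Spec_get_overlap_sentences sentences target_tokens (get_overlap_sentences sentences target_tokens)

-- ===== LEMMAS AND PROOFS =====

-- sum of the token counts of the first i elements of rs (rs = sentences.reverse)
def pvSums (rs : List String) (i : Nat) : Int := ((rs.take i).map pvTok).sum

-- greedy: how many leading elements of rs fit into budget t
def pvGreedy (t : Int) : List String → Nat
  | [] => 0
  | s :: r => if pvTok s ≤ t then pvGreedy (t - pvTok s) r + 1 else 0

theorem pvTok_nonneg (s : String) : 0 ≤ pvTok s := Int.natCast_nonneg _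

theorem pvSums_nil (i : Nat) : pvSums [] i = 0 := by simp [pvSums]

theorem pvSums_zero (rs : List String) : pvSums rs 0 = 0 := by simp [pvSums]

theorem pvSums_cons (s : String) (r : List String) (i : Nat) :
    pvSums (s :: r) (i + 1) = pvTok s + pvSums r i := by
  simp [pvSums]

theorem pvSums_nonneg (rs : List String) (i : Nat) : 0 ≤ pvSums rs i := by
  induction rs generalizing i with
  | nil => simp [pvSums_nil]
  | cons s r ih =>
    cases i with
    | zero => simp [pvSums_zero]
    | succ j => rw [pvSums_cons]; have := pvTok_nonneg s; have := ih j; omega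

theorem pvSums_mono (rs : List String) (i j : Nat) (h : i ≤ j) :
    pvSums rs i ≤ pvSums rs j := by
  induction rs generalizing i j with
  | nil => simp [pvSums_nil]
  | cons s r ih =>
    cases i with
    | zero =>
      rw [pvSums_zero]
      cases j with
      | zero => simp [pvSums_zero]
      | succ j' => rw [pvSums_cons]; have := pvTok_nonneg s; have := pvSums_nonneg r j'; omega
    | succ i' =>
      cases j with
      | zero => omega
      | succ j' => rw [pvSums_cons, pvSums_cons]; have := ih i' j' (by omega); omega

theorem pvGreedy_le_length (t : Int) (rs : List String) : pvGreedy t rs ≤ rs.length := by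
  induction rs generalizing t with
  | nil => simp [pvGreedy]
  | cons s r ih =>
    simp only [pvGreedy, List.length_cons]
    split
    · have := ih (t - pvTok s); omega
    · omega

theorem pvGreedy_sums_le (rs : List String) (t : Int) (i : Nat)
    (ht : 0 ≤ t) (hi : i ≤ pvGreedy t rs) : pvSums rs i ≤ t := by
  induction rs generalizing t i with
  | nil => simp_all [pvGreedy, pvSums_nil]
  | cons s r ih =>
    simp only [pvGreedy] at hi
    split at hi
    · cases i with
      | zero => simpa [pvSums_zero] using ht
      | succ j =>
        rw [pvSums_cons]
        have := ih (t - pvTok s) j (by omega) (by omega)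
        omega
    · have : i = 0 := by omega
      subst this
      simpa [pvSums_zero] using ht

theorem pvGreedy_sums_gt (rs : List String) (t : Int)
    (h : pvGreedy t rs < rs.length) : t < pvSums rs (pvGreedy t rs + 1) := by
  induction rs generalizing t with
  | nil => simp at h
  | cons s r ih =>
    simp only [pvGreedy, List.length_cons] at h ⊢
    by_cases hc : pvTok s ≤ t
    · rw [if_pos hc] at h ⊢
      rw [pvSums_cons]
      have := ih (t - pvTok s) (by omega)
      omega
    · rw [if_neg hc] at h ⊢
      rw [pvSums_cons, pvSums_zero]
      omega

theorem pvSuffixFrom_length (acc : Int) (rs : List String) :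
    (pvSuffixFrom acc rs).length = rs.length := by
  induction rs generalizing acc with
  | nil => simp [pvSuffixFrom]
  | cons s r ih => simp [pvSuffixFrom, ih]

theorem pvSuffixFrom_getD (rs : List String) (acc : Int) (i : Nat) (h : i ≤ rs.length) :
    (acc :: pvSuffixFrom acc rs).getD i 0 = acc + pvSums rs i := by
  induction rs generalizing acc i with
  | nil =>
    have : i = 0 := by simpa using h
    subst this
    simp [pvSuffixFrom, pvSums_zero]
  | cons s r ih =>
    cases i with
    | zero => simp [pvSums_zero]
    | succ j =>
      have : (acc :: pvSuffixFrom acc (s :: r)).getD (j + 1) 0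
           = ((acc + pvTok s) :: pvSuffixFrom (acc + pvTok s) r).getD j 0 := by
        simp [pvSuffixFrom]
      rw [this, ih (acc + pvTok s) j (by simpa using h), pvSums_cons]
      ring

-- the bisect loop returns the boundary b of any downward-closed predicate
theorem pvBsearch_eq (suffix : List Int) (t : Int) (b : Nat)
    (hiff : ∀ i, i < suffix.length → (suffix.getD i 0 ≤ t ↔ i < b))
    (lo hi : Nat) (h1 : lo ≤ b) (h2 : b ≤ hi) (h3 : hi ≤ suffix.length) :
    pvBsearch suffix t lo hi = b := by
  rw [pvBsearch]
  by_cases hlt : lo < hi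
  · simp only [hlt, if_true]
    have hmid : (lo + hi) / 2 < suffix.length := by omega
    by_cases hp : suffix.getD ((lo + hi) / 2) 0 ≤ t
    · have hb : (lo + hi) / 2 < b := (hiff _ hmid).mp hp
      simp only [hp, if_pos]
      exact pvBsearch_eq suffix t b hiff _ hi (by omega) h2 h3
    · have hb : b ≤ (lo + hi) / 2 := by
        by_contra hcon
        exact hp ((hiff _ hmid).mpr (by omega))
      simp only [hp, if_neg, not_false_iff]
      exact pvBsearch_eq suffix t b hiff lo _ h1 hb (by omega)
  · simp only [hlt, if_false]
    omega
termination_by hi - lo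
decreasing_by all_goals omega

-- A's loop is: take greedily from the reversed list, result reversed back
theorem pvGoA_eq (rs : List String) (target tc : Int) (acc : List String) :
    pvGoA rs target tc acc = (rs.take (pvGreedy (target - tc) rs)).reverse ++ acc := by
  induction rs generalizing tc acc with
  | nil => simp [pvGoA, pvGreedy]
  | cons s r ih =>
    simp only [pvGoA, pvGreedy]
    by_cases hc : tc + pvTok s ≤ target
    · rw [if_pos hc, if_pos (by omega), ih]
      have : target - (tc + pvTok s) = target - tc - pvTok s := by ring
      simp [this, List.append_assoc]
    · rw [if_neg hc, if_neg (by omega)]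
      simp

theorem reverse_take_reverse (l : List String) (g : Nat) :
    (l.reverse.take g).reverse = l.drop (l.length - g) := by
  rw [← List.rtake_eq_reverse_take_reverse]
  rfl

-- ===== VERDICT (by name: the statement is the Claim_ definition above) =====
theorem get_overlap_sentences_spec : Claim_equal_get_overlap_sentences := by
  unfold Claim_equal_get_overlap_sentences
  intro sentences t _
  unfold Spec_get_overlap_sentences
  set rs := sentences.reverse with hrs
  set n := sentences.length with hn
  have hrslen : rs.length = n := by simp [hrs, hn]
  set g := pvGreedy t rs with hg
  have hgle : g ≤ n := hrslen ▸ pvGreedy_le_length t rs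
  -- A's value
  have hA : get_overlap_sentences sentences t = sentences.drop (n - g) := by
    unfold get_overlap_sentences
    rw [pvGoA_eq]
    simp only [sub_zero, List.append_nil, ← hrs, ← hg]
    exact reverse_take_reverse sentences g
  -- the boundary of the predicate "suffix[i] ≤ t"
  set b : Nat := if 0 ≤ t then g + 1 else 0 with hb
  have hsuflen : (0 :: pvSuffixFrom 0 rs).length = n + 1 := by
    simp [pvSuffixFrom_length, hrslen]
  have hiff : ∀ i, i < (0 :: pvSuffixFrom 0 rs).length →
      ((0 :: pvSuffixFrom 0 rs).getD i 0 ≤ t ↔ i < b) := by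
    intro i hi
    rw [hsuflen] at hi
    rw [pvSuffixFrom_getD rs 0 i (by omega), zero_add]
    by_cases ht : 0 ≤ t
    · rw [hb, if_pos ht]
      constructor
      · intro hle
        by_contra hcon
        have hgi : g + 1 ≤ i := by omega
        have hgn : g < rs.length := by omega
        have h1 := pvGreedy_sums_gt rs t hgn
        have h2 := pvSums_mono rs (g + 1) i hgi
        rw [← hg] at h1
        omega
      · intro hlt
        exact pvGreedy_sums_le rs t i ht (by omega)
    · rw [hb, if_neg ht]
      have := pvSums_nonneg rs i
      constructor
      · intro hle; omega
      · intro hcon; omega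
  have hble : b ≤ n + 1 := by rw [hb]; split <;> omega
  have hbs : pvBsearch (0 :: pvSuffixFrom 0 rs) t 0 (0 :: pvSuffixFrom 0 rs).length = b :=
    pvBsearch_eq _ t b hiff 0 _ (by omega) (by rw [hsuflen]; exact hble) (le_refl _)
  -- B's value
  have hB : get_overlap_sentences_alt sentences t = sentences.drop (n - g) := by
    unfold get_overlap_sentences_alt
    simp only [← hrs, ← hn, hbs]
    by_cases ht : 0 ≤ t
    · rw [hb, if_pos ht]
      by_cases hg0 : g = 0
      · rw [if_pos (by push_cast; omega), hg0]
        simp [hn]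
      · rw [if_neg (by push_cast; omega)]
        rw [show (n : Int) - (((g + 1 : Nat) : Int) - 1) = ((n - g : Nat) : Int) by push_cast; omega]
        rw [PySem.List.slice_from_natCast]
    · rw [hb, if_neg ht]
      rw [if_pos (by norm_num)]
      have hg0 : g = 0 := by
        cases hrsc : rs with
        | nil => simp [hg, hrsc, pvGreedy]
        | cons s r =>
          rw [hg, hrsc]
          simp only [pvGreedy]
          rw [if_neg (by have := pvTok_nonneg s; omega)]
      rw [hg0]
      simp [hn]
  rw [hA, hB]
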